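-- pv_equiv track=rewrite | github.com/zuoxiang95/Learning-DeepLearning | algorithms/longestPalindrome.py | longestPalindrome1
-- ===== SOURCE A (Python) =====
-- def longestPalindrome1(s):
--     # Write your code here
--     my_dict = {}
--     for i in s:
--         if i not in my_dict:
--             my_dict[i] = 1
--         else:
--             my_dict[i] += 1
--     my_sum = sum(v & ~1 for v in my_dict.values())
--     return my_sum + (my_sum < len(s))
-- ===== SOURCE B (Python) =====
-- def longestPalindrome1(s):
--     # Toggle a set of characters seen an odd number of times; no counting pass.
--     odd = set()
--     for c in s:
--         if c in odd:
--             odd.discard(c)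
--         else:
--             odd.add(c)
--     k = len(odd)
--     return len(s) - max(k - 1, 0)
-- ===== Notes on version B (the rewrite author's own statement) =====
-- stated objective: alternative
-- what changed: Replaces the frequency dictionary plus even-part summation with a single parity-toggle set: each char flips its membership, and the answer is len(s) - max(len(odd)-1, 0).
import Mathlib
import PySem

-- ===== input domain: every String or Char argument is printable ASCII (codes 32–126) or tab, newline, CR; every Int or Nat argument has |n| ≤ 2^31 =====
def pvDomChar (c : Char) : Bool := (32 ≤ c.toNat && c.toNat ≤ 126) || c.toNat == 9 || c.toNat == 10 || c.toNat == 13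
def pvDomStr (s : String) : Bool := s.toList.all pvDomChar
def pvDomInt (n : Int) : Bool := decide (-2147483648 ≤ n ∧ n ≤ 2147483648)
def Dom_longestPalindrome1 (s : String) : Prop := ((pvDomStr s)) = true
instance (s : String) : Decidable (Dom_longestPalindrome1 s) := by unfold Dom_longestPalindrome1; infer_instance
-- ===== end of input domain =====

-- B replaces A's frequency dictionary + even-part summation with a single parity-toggle set
-- (alternative decomposition; same O(n) cost).

-- ===== PORT A =====
-- builds a char→count dict, sums v & ~1 over the values, adds 1 if that sum is short of len(s)
def longestPalindrome1 (s : String) : Int :=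
  let myDict : PySem.Dict Char Int :=
    s.toList.foldl
      (fun d i => if d.contains i = false then d.insert i 1 else d.modify i 0 (· + 1))
      PySem.Dict.empty
  let mySum : Int := (myDict.values.map (fun v => Int.land v (-2))).sum
  mySum + (if mySum < PySem.Str.len s then 1 else 0)

-- ===== PORT B =====
-- toggles each char's membership in a set; k = #chars with odd count; len(s) - max(k-1, 0)
def longestPalindrome1_alt (s : String) : Int :=
  let odd : PySem.Set Char :=
    s.toList.foldl
      (fun odd c => if PySem.Set.contains odd c = true then PySem.Set.discard odd c
                    else PySem.Set.add odd c)
      PySem.Set.empty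
  let k : Int := PySem.Set.len odd
  PySem.Str.len s - max (k - 1) 0

-- ===== PRECONDITION & SPEC =====
def Spec_longestPalindrome1 (s : String) (out : Int) : Prop := out = longestPalindrome1_alt s
instance (s : String) (out : Int) : Decidable (Spec_longestPalindrome1 s out) := by unfold Spec_longestPalindrome1; infer_instance

-- ===== CLAIM (what is proved, stated in full; the proofs are below) =====
def Claim_equal_longestPalindrome1 : Prop := ∀ (s : String), Dom_longestPalindrome1 s → Spec_longestPalindrome1 s (longestPalindrome1 s)

-- ===== LEMMAS AND PROOFS =====

-- v & ~1 clears the low bit: for a natural value it is 2 * (v / 2)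
theorem pvLand (n : Nat) : Int.land (Int.ofNat n) (-2) = Int.ofNat (2 * (n / 2)) := by
  show Int.ofNat (Nat.ldiff n 1) = _
  congr 1
  apply Nat.eq_of_testBit_eq
  intro i
  cases i with
  | zero =>
      rw [Nat.testBit_ldiff]
      simp [Nat.testBit_zero]
  | succ j =>
      rw [Nat.testBit_ldiff, Nat.testBit_succ, Nat.testBit_succ, Nat.testBit_succ]
      simp

-- A's membership-branching dict loop is exactly the Counter loop
theorem pvDictA (l : List Char) :
    l.foldl (fun d i => if d.contains i = false then d.insert i 1 else d.modify i 0 (· + 1))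
      PySem.Dict.empty = PySem.Dict.counter l := by
  rw [PySem.Dict.counter_eq_foldl]
  congr 1
  funext d i
  by_cases h : d.contains i
  · simp [h, PySem.Dict.modify]
  · simp only [Bool.not_eq_true] at h
    simp [h, PySem.Dict.modify, PySem.Dict.getD_of_not_contains d (0 : Int) h]

theorem pvValuesCounter (l : List Char) :
    (PySem.Dict.counter l).values
      = (PySem.Set.ofList l).map (fun c => (l.count c : Int)) := by
  simp [PySem.Dict.values, PySem.Dict.items_counter]

theorem pvSumCounts (l : List Char) :
    ((PySem.Set.ofList l).map (fun c => (l.count c : Int))).sum = (l.length : Int) := by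
  have hperm : (PySem.Set.ofList l).Perm l.dedup :=
    (List.perm_ext_iff_of_nodup (PySem.Set.nodup_ofList l) l.nodup_dedup).mpr
      (by intro a; simp [PySem.Set.mem_ofList, List.mem_dedup])
  rw [(hperm.map (fun c => (l.count c : Int))).sum_eq,
    ← List.sum_map_count_dedup_eq_length l, Nat.cast_list_sum, List.map_map]
  rfl

theorem pvSumSub (S : List Char) (f g : Char → Int) :
    (S.map (fun c => f c - g c)).sum = (S.map f).sum - (S.map g).sum := by
  induction S with
  | nil => simp
  | cons a t ih => simp [ih]; ring

-- my_sum = len(l) - (number of distinct chars with odd count)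
theorem pvMySum (l : List Char) :
    (((PySem.Dict.counter l).values.map (fun v => Int.land v (-2))).sum)
      = (l.length : Int) - ((PySem.Set.ofList l).countP (fun c => l.count c % 2 == 1) : Int) := by
  rw [pvValuesCounter, List.map_map]
  have hfun : ((fun v => Int.land v (-2)) ∘ (fun c => (l.count c : Int)))
      = fun c => (l.count c : Int) - (if (l.count c % 2 == 1) = true then 1 else 0) := by
    funext c
    show Int.land (Int.ofNat (l.count c)) (-2) = _
    rw [pvLand]
    rcases Nat.mod_two_eq_zero_or_one (l.count c) with h | h <;> simp [h] <;> omega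
  rw [hfun, pvSumSub, pvSumCounts, PySem.List.sum_map_ite_one_zero]

-- membership in the toggle set = parity of the count so far
theorem pvToggleMem (l : List Char) : ∀ (S : PySem.Set Char) (x : Char),
    (x ∈ l.foldl (fun odd c => if PySem.Set.contains odd c = true then PySem.Set.discard odd c
                  else PySem.Set.add odd c) S)
      ↔ ((x ∈ S) ↔ l.count x % 2 = 0) := by
  induction l with
  | nil => intro S x; simp
  | cons c t ih =>
      intro S x
      rw [List.foldl_cons, ih]
      by_cases hx : x = c
      · subst hx
        by_cases hc : x ∈ S <;>
          simp [hc, PySem.Set.mem_discard, List.count_cons_self] <;>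
          omega
      · have hxc : ¬ c = x := fun h => hx h.symm
        by_cases hc : c ∈ S <;>
          simp [hc, PySem.Set.mem_discard, hx, hxc]

theorem pvToggleNodup (l : List Char) : ∀ (S : PySem.Set Char), S.Nodup →
    (l.foldl (fun odd c => if PySem.Set.contains odd c = true then PySem.Set.discard odd c
      else PySem.Set.add odd c) S).Nodup := by
  induction l with
  | nil => intro S h; exact h
  | cons c t ih =>
      intro S h
      rw [List.foldl_cons]
      apply ih
      by_cases hc : PySem.Set.contains S c = true
      · rw [if_pos hc]
        exact PySem.Set.nodup_discard S c h
      · rw [if_neg hc]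
        exact PySem.Set.nodup_add S c h

-- size of the toggle set = number of distinct chars with odd count
theorem pvToggleLen (l : List Char) :
    ((l.foldl (fun odd c => if PySem.Set.contains odd c = true then PySem.Set.discard odd c
      else PySem.Set.add odd c) PySem.Set.empty).length : Int)
      = ((PySem.Set.ofList l).countP (fun c => l.count c % 2 == 1) : Int) := by
  rw [List.countP_eq_length_filter]
  congr 1
  apply List.Perm.length_eq
  apply (List.perm_ext_iff_of_nodup (pvToggleNodup l _ (by simp [PySem.Set.empty]))
    ((PySem.Set.nodup_ofList l).filter _)).mpr
  intro a
  rw [pvToggleMem, List.mem_filter, PySem.Set.mem_ofList]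
  constructor
  · intro h
    have hodd : l.count a % 2 = 1 := by
      rcases Nat.mod_two_eq_zero_or_one (l.count a) with h2 | h2
      · exact absurd (h.mpr h2) (by simp [PySem.Set.empty])
      · exact h2
    have hmem : a ∈ l := by
      rw [← List.count_pos_iff]; omega
    exact ⟨hmem, by simp [hodd]⟩
  · intro ⟨hmem, hodd⟩
    simp only [beq_iff_eq] at hodd
    simp [PySem.Set.empty]
    omega

-- ===== VERDICT (by name: the statement is the Claim_ definition above) =====
theorem longestPalindrome1_spec : Claim_equal_longestPalindrome1 := by
  intro s _
  unfold Spec_longestPalindrome1 longestPalindrome1 longestPalindrome1_alt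
  dsimp only [PySem.Set.len]
  rw [pvDictA, pvMySum, PySem.Str.len_eq, pvToggleLen]
  set k : Int := ((PySem.Set.ofList s.toList).countP (fun c => s.toList.count c % 2 == 1) : Int) with hk
  have hk0 : 0 ≤ k := by exact Int.natCast_nonneg _
  set n : Int := (s.toList.length : Int)
  rcases eq_or_lt_of_le hk0 with h | h
  · rw [if_neg (by omega)]
    omega
  · rw [if_pos (by omega)]
    omega
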